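-- pv_equiv track=rewrite | github.com/Benjamin-VRB/IN200_Sudoku | Grille/Archive.py | trouver_groupes_verticaux_kakuro
-- ===== SOURCE A (Python) =====
-- def trouver_groupes_verticaux_kakuro(grille: list[list:int]):
--     groupes = []
--     dimension = len(grille)
--     for colonne in range(dimension):
--         groupe = []
--         for ligne in range(dimension):
--             if grille[ligne][colonne] == 0:
--                 groupe.append((ligne, colonne))
--             else:
--                 if len(groupe) >= 2:
--                     groupes.append(groupe)
--                 groupe = []
--         if len(groupe) >= 2:
--             groupes.append(groupe)
--     return groupes
-- ===== SOURCE B (Python) =====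
-- def trouver_groupes_verticaux_kakuro(grille: list[list:int]):
--     # Segment-then-filter: per column, scan maximal runs of equal zero-ness
--     # and keep the zero runs of length >= 2.
--     n = len(grille)
--     groupes = []
--     for colonne in range(n):
--         flags = [grille[ligne][colonne] == 0 for ligne in range(n)]
--         ligne = 0
--         while ligne < n:
--             fin = ligne + 1
--             while fin < n and flags[fin] == flags[ligne]:
--                 fin += 1
--             if flags[ligne] and fin - ligne >= 2:
--                 groupes.append([(l, colonne) for l in range(ligne, fin)])
--             ligne = fin
--     return groupes
-- ===== Notes on version B (the rewrite author's own statement) =====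
-- stated objective: alternative
-- what changed: Replaces A's accumulate-and-flush inner loop (pending group appended or reset cell by cell, with a final flush after the loop) by a run-segmentation scan: each column is split into maximal runs of equal zero-ness and the zero runs of length >= 2 are emitted directly.
import Mathlib
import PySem

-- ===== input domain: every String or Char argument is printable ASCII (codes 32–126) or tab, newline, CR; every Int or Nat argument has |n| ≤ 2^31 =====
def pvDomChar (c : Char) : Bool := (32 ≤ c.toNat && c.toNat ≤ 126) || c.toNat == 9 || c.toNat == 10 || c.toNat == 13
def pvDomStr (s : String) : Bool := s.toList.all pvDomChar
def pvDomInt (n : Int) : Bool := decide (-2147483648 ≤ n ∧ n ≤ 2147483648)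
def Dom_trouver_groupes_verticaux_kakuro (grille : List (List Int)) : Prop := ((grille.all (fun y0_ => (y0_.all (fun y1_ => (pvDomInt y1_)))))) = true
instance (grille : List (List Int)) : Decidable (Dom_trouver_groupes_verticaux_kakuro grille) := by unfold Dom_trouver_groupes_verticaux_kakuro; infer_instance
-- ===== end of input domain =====

-- B replaces A's cell-by-cell accumulate-and-flush of a pending group by a per-column
-- run-segmentation scan (maximal runs of equal zero-ness, keep zero runs of length ≥ 2);
-- objective: alternative decomposition, same O(n^2) cost.

-- ===== PORT A =====
-- grille[ligne][colonne] is ported with pyGetD (default only reachable outside Pre_).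
def trouver_groupes_verticaux_kakuro (grille : List (List Int)) : List (List (Int × Int)) :=
  let dimension := PySem.List.len grille
  (PySem.List.pyRange 0 dimension 1).foldl (fun groupes colonne =>
    let st := (PySem.List.pyRange 0 dimension 1).foldl
      (fun (st : List (List (Int × Int)) × List (Int × Int)) ligne =>
        if PySem.List.pyGetD (PySem.List.pyGetD grille ligne []) colonne 1 = 0 then
          (st.1, st.2 ++ [(ligne, colonne)])
        else if st.2.length ≥ 2 then (st.1 ++ [st.2], ([] : List (Int × Int)))
        else (st.1, []))
      (groupes, [])
    if st.2.length ≥ 2 then st.1 ++ [st.2] else st.1) []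

-- ===== PORT B =====
-- the `while ligne < n` scan of Source B: one recursive step per maximal run of equal flags
def pvColRunsB (colonne : Int) (flags : List Bool) (ligne : Int) : List (List (Int × Int)) :=
  match flags with
  | [] => []
  | b :: rest =>
    (if b ∧ (rest.takeWhile (· == b)).length + 1 ≥ 2 then
       [(PySem.List.pyRange ligne (ligne + ((rest.takeWhile (· == b)).length + 1)) 1).map
          (fun l => (l, colonne))]
     else [])
    ++ pvColRunsB colonne (rest.drop (rest.takeWhile (· == b)).length)
        (ligne + ((rest.takeWhile (· == b)).length + 1))
termination_by flags.length
decreasing_by simp [List.length_drop]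

def trouver_groupes_verticaux_kakuro_alt (grille : List (List Int)) : List (List (Int × Int)) :=
  let n := PySem.List.len grille
  (PySem.List.pyRange 0 n 1).foldl (fun groupes colonne =>
    groupes ++ pvColRunsB colonne
      ((PySem.List.pyRange 0 n 1).map (fun ligne =>
        PySem.List.pyGetD (PySem.List.pyGetD grille ligne []) colonne 1 == 0)) 0) []

-- ===== PRECONDITION & SPEC =====
-- Pre_: every row at least as long as the grid height — exactly where Python A
-- returns without IndexError (it reads grille[ligne][colonne] for all ligne, colonne < len(grille)).
def Pre_trouver_groupes_verticaux_kakuro (grille : List (List Int)) : Prop :=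
  ∀ row ∈ grille, grille.length ≤ row.length
instance (grille : List (List Int)) : Decidable (Pre_trouver_groupes_verticaux_kakuro grille) := by
  unfold Pre_trouver_groupes_verticaux_kakuro; infer_instance

def pvWitness_trouver_groupes_verticaux_kakuro : List (List Int) :=
  [[0, 1, 0], [0, 5, 0], [1, 0, 0]]

def Spec_trouver_groupes_verticaux_kakuro (grille : List (List Int)) (out : List (List (Int × Int))) : Prop := out = trouver_groupes_verticaux_kakuro_alt grille
instance (grille : List (List Int)) (out : List (List (Int × Int))) : Decidable (Spec_trouver_groupes_verticaux_kakuro grille out) := by unfold Spec_trouver_groupes_verticaux_kakuro; infer_instance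

-- ===== CLAIM (what is proved, stated in full; the proofs are below) =====
def Claim_equal_trouver_groupes_verticaux_kakuro : Prop := ∀ (grille : List (List Int)), Dom_trouver_groupes_verticaux_kakuro grille → Pre_trouver_groupes_verticaux_kakuro grille → Spec_trouver_groupes_verticaux_kakuro grille (trouver_groupes_verticaux_kakuro grille)

-- ===== LEMMAS AND PROOFS =====

-- A's inner loop, abstracted over the zero-flag function f
def pvStepA (f : Int → Bool) (c : Int)
    (st : List (List (Int × Int)) × List (Int × Int)) (l : Int) :
    List (List (Int × Int)) × List (Int × Int) :=
  if f l then (st.1, st.2 ++ [(l, c)])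
  else if st.2.length ≥ 2 then (st.1 ++ [st.2], [])
  else (st.1, [])

def pvLoopA (f : Int → Bool) (c : Int) (a : Int) (k : Nat)
    (st : List (List (Int × Int)) × List (Int × Int)) :
    List (List (Int × Int)) × List (Int × Int) :=
  match k with
  | 0 => st
  | Nat.succ k => pvLoopA f c (a + 1) k (pvStepA f c st a)

def pvFlushA (st : List (List (Int × Int)) × List (Int × Int)) : List (List (Int × Int)) :=
  if st.2.length ≥ 2 then st.1 ++ [st.2] else st.1

theorem pvL1 (f : Int → Bool) (c : Int) : ∀ (k : Nat) (a : Int) st,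
    (PySem.List.pyRange a (a + k) 1).foldl (pvStepA f c) st = pvLoopA f c a k st := by
  intro k
  induction k with
  | zero => intro a st; simp [PySem.List.pyRange_one_eq_nil, pvLoopA]
  | succ k ih =>
    intro a st
    rw [PySem.List.pyRange_one_cons (by push_cast; omega)]
    have h : a + (↑(k + 1) : Int) = (a + 1) + ↑k := by push_cast; omega
    rw [h]
    simp only [List.foldl_cons]
    rw [ih (a + 1)]
    rfl

theorem pvL2 (f : Int → Bool) (c : Int) : ∀ (k : Nat) (a : Int) g gs,
    pvLoopA f c a k (gs, g) =
      (gs ++ (pvLoopA f c a k ([], g)).1, (pvLoopA f c a k ([], g)).2) := by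
  intro k
  induction k with
  | zero => intro a g gs; simp [pvLoopA]
  | succ k ih =>
    intro a g gs
    simp only [pvLoopA, pvStepA]
    by_cases hf : f a
    · simp only [hf, if_true]
      exact ih (a + 1) (g ++ [(a, c)]) gs
    · by_cases hg : g.length ≥ 2
      · simp only [hf, hg, Bool.false_eq_true, if_false, if_true, List.nil_append]
        rw [ih (a + 1) [] (gs ++ [g]), ih (a + 1) [] [g]]
        simp [List.append_assoc]
      · simp only [hf, hg, Bool.false_eq_true, if_false, List.nil_append]
        exact ih (a + 1) [] gs

theorem pvL3 (f : Int → Bool) (c : Int) : ∀ (j : Nat) (k : Nat) (a : Int) g,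
    (∀ i : Int, a ≤ i → i < a + j → f i = true) →
    pvLoopA f c a (j + k) ([], g) =
      pvLoopA f c (a + j) k ([], g ++ (PySem.List.pyRange a (a + j) 1).map (fun l => (l, c))) := by
  intro j
  induction j with
  | zero => intro k a g _; simp [PySem.List.pyRange_one_eq_nil]
  | succ j ih =>
    intro k a g h
    have hfa : f a = true := h a le_rfl (by push_cast; omega)
    have hk : j + 1 + k = Nat.succ (j + k) := by omega
    rw [hk]
    simp only [pvLoopA, pvStepA, hfa, if_true]
    rw [ih k (a + 1) (g ++ [(a, c)]) (by intro i h1 h2; exact h i (by omega) (by push_cast at *; omega))]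
    push_cast
    rw [show a + ((j : Int) + 1) = a + 1 + (j : Int) by omega]
    rw [PySem.List.pyRange_one_cons (show a < a + 1 + (j : Int) by omega)]
    simp [List.append_assoc]

theorem pvL4 (f : Int → Bool) (c : Int) : ∀ (j : Nat) (k : Nat) (a : Int),
    (∀ i : Int, a ≤ i → i < a + j → f i = false) →
    pvLoopA f c a (j + k) ([], []) = pvLoopA f c (a + j) k ([], []) := by
  intro j
  induction j with
  | zero => intro k a _; simp
  | succ j ih =>
    intro k a h
    have hfa : f a = false := h a le_rfl (by push_cast; omega)
    have : j + 1 + k = Nat.succ (j + k) := by omega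
    rw [this]
    simp only [pvLoopA, pvStepA, hfa, Bool.false_eq_true, if_false, List.length_nil]
    simp only [show ¬ ((2:Nat) ≤ 0) by omega, if_false]
    rw [ih k (a + 1) (by intro i h1 h2; exact h i (by omega) (by push_cast at *; omega))]
    congr 1
    push_cast; omega

theorem pvL5 (f : Int → Bool) (c : Int) (a : Int) (k : Nat) (g : List (Int × Int))
    (hf : f a = false) :
    pvFlushA (pvLoopA f c a (k + 1) ([], g)) =
      (if g.length ≥ 2 then [g] else []) ++ pvFlushA (pvLoopA f c (a + 1) k ([], [])) := by
  show pvFlushA (pvLoopA f c (a + 1) k (pvStepA f c ([], g) a)) = _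
  simp only [pvStepA, hf, Bool.false_eq_true, if_false, List.nil_append]
  by_cases hg : g.length ≥ 2
  · simp only [hg, if_true]
    rw [pvL2 f c k (a + 1) [] [g]]
    unfold pvFlushA
    split_ifs <;> simp
  · simp [hg]

theorem pvStepFalseEmpty (f : Int → Bool) (c : Int) (a : Int) (k : Nat) (hf : f a = false) :
    pvLoopA f c a (k + 1) ([], []) = pvLoopA f c (a + 1) k ([], []) := by
  show pvLoopA f c (a+1) k (pvStepA f c ([], []) a) = _
  simp [pvStepA, hf]

theorem pvMain (f : Int → Bool) (c : Int) : ∀ (k : Nat) (a : Int),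
    pvFlushA (pvLoopA f c a k ([], [])) =
      pvColRunsB c ((PySem.List.pyRange a (a + k) 1).map f) a := by
  intro k
  induction k using Nat.strong_induction_on with
  | _ k ih =>
    intro a
    match k with
    | 0 => simp [PySem.List.pyRange_one_eq_nil, pvColRunsB, pvLoopA, pvFlushA]
    | Nat.succ k0 =>
      have hcast : a + (Nat.succ k0 : Int) = a + 1 + (k0 : Int) := by push_cast; omega
      rw [hcast, PySem.List.pyRange_one_cons (by omega), List.map_cons]
      set rest := (PySem.List.pyRange (a + 1) (a + 1 + (k0 : Int)) 1).map f with hrest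
      set t := rest.takeWhile (· == f a) with ht
      set j := t.length with hj
      have hpre : t <+: rest := ht ▸ List.takeWhile_prefix _
      have hlenrest : rest.length = k0 := by
        rw [hrest, List.length_map, PySem.List.length_pyRange_one]; omega
      have hjk : j ≤ k0 := by have := hpre.length_le; omega
      have hsplit : PySem.List.pyRange (a + 1) (a + 1 + (k0 : Int)) 1
          = PySem.List.pyRange (a + 1) (a + 1 + (j : Int)) 1
            ++ PySem.List.pyRange (a + 1 + (j : Int)) (a + 1 + (k0 : Int)) 1 :=
        PySem.List.pyRange_one_append _ _ _ (by omega) (by omega)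
      have hlen1 : ((PySem.List.pyRange (a + 1) (a + 1 + (j : Int)) 1).map f).length = j := by
        rw [List.length_map, PySem.List.length_pyRange_one]; omega
      have htake : t = (PySem.List.pyRange (a + 1) (a + 1 + (j : Int)) 1).map f := by
        have h1 : t = rest.take j := by
          have h2 := List.prefix_iff_eq_take.mp hpre; rwa [← hj] at h2
        rw [h1, hrest, hsplit, List.map_append]; exact List.take_left' hlen1
      have hdrop : rest.drop j
          = (PySem.List.pyRange (a + 1 + (j : Int)) (a + 1 + (k0 : Int)) 1).map f := by
        rw [hrest, hsplit, List.map_append]; exact List.drop_left' hlen1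
      have hblock : ∀ i : Int, a ≤ i → i < a + 1 + (j : Int) → f i = f a := by
        intro i h1 h2
        rcases eq_or_lt_of_le h1 with h | h
        · rw [← h]
        · have hmem : f i ∈ t := by
            rw [htake]
            exact List.mem_map_of_mem (by rw [PySem.List.mem_pyRange_one]; omega)
          have hp := List.mem_takeWhile_imp (ht ▸ hmem)
          simpa using hp
      have hfuel : Nat.succ k0 = (j + 1) + (k0 - j) := by omega
      rw [pvColRunsB, ← ht, ← hj]
      by_cases hfa : f a = true
      · -- leading zero-run of length j+1
        have hA := pvL3 f c (j + 1) (k0 - j) a []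
          (by intro i h1 h2; rw [hblock i h1 (by push_cast at h2 ⊢; omega)]; exact hfa)
        rw [hfuel, hA, List.nil_append]
        have hje : a + ((j + 1 : Nat) : Int) = a + 1 + (j : Int) := by push_cast; omega
        rw [hje] at hA ⊢
        set run := (PySem.List.pyRange a (a + 1 + (j : Int)) 1).map (fun l => (l, c)) with hrun
        have hrunlen : run.length = j + 1 := by
          rw [hrun, List.length_map, PySem.List.length_pyRange_one]; omega
        have hrunB : (PySem.List.pyRange a (a + ((j : Int) + 1)) 1).map (fun l => (l, c)) = run := by
          rw [hrun, show a + ((j : Int) + 1) = a + 1 + (j : Int) by omega]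
        rcases Nat.lt_or_ge j k0 with hjlt | hge
        · -- a false flag follows the run
          have hdw : rest.dropWhile (· == f a) = rest.drop j := by
            have h0 : t ++ rest.dropWhile (· == f a) = rest := by
              rw [ht]; exact List.takeWhile_append_dropWhile
            calc rest.dropWhile (· == f a)
                = (t ++ rest.dropWhile (· == f a)).drop t.length := List.drop_left.symm
              _ = rest.drop j := by rw [h0, ← hj]
          have hconsd : rest.drop j
              = f (a + 1 + (j : Int))
                :: (PySem.List.pyRange (a + 1 + (j : Int) + 1) (a + 1 + (k0 : Int)) 1).map f := by
            rw [hdrop, PySem.List.pyRange_one_cons (by omega), List.map_cons]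
          have hnext : f (a + 1 + (j : Int)) = false := by
            have hh := List.head?_dropWhile_not (· == f a) rest
            rw [hdw, hconsd] at hh
            simp only [List.head?_cons] at hh
            rw [hfa] at hh
            simpa using hh
          have hd0 : k0 - j = (k0 - j - 1) + 1 := by omega
          rw [hd0, pvL5 f c (a + 1 + (j : Int)) (k0 - j - 1) run hnext,
            ← pvStepFalseEmpty f c (a + 1 + (j : Int)) (k0 - j - 1) hnext, ← hd0,
            ih (k0 - j) (by omega) (a + 1 + (j : Int))]
          have hend : a + 1 + (j : Int) + ((k0 - j : Nat) : Int) = a + 1 + (k0 : Int) := by omega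
          rw [hend, ← hdrop, hrunlen]
          rw [show a + ((j : Int) + 1) = a + 1 + (j : Int) from by omega]
          simp [hfa, hrun]
        · -- the run reaches the bottom of the column
          have hje2 : j = k0 := le_antisymm hjk hge
          have h0 : k0 - j = 0 := by omega
          rw [h0]
          have hdnil : rest.drop j = [] := by
            rw [hdrop, hje2, PySem.List.pyRange_one_eq_nil le_rfl, List.map_nil]
          rw [hdnil, pvColRunsB]
          show pvFlushA ([], run) = _
          unfold pvFlushA
          rw [show ([], run).2 = run from rfl, show (([] : List (List (Int × Int))), run).1 = [] from rfl, hrunlen]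
          simp [hfa, hrunB]
      · -- leading non-zero run
        have hfa' : f a = false := by simpa using hfa
        have hA := pvL4 f c (j + 1) (k0 - j) a
          (by intro i h1 h2; rw [hblock i h1 (by push_cast at h2 ⊢; omega)]; exact hfa')
        rw [hfuel, hA, ih (k0 - j) (by omega)]
        rw [show a + ((j + 1 : Nat) : Int) = a + 1 + (j : Int) from by push_cast; omega]
        rw [show a + 1 + (j : Int) + ((k0 - j : Nat) : Int) = a + 1 + (k0 : Int) from by omega]
        rw [← hdrop]
        rw [show a + ((j : Int) + 1) = a + 1 + (j : Int) from by omega]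
        simp [hfa']

theorem pvFlushAppend (gs : List (List (Int × Int)))
    (st : List (List (Int × Int)) × List (Int × Int)) :
    pvFlushA (gs ++ st.1, st.2) = gs ++ pvFlushA st := by
  unfold pvFlushA
  split_ifs <;> simp

theorem pvCol (grille : List (List Int)) (c : Int) (gs : List (List (Int × Int))) :
    (let st := (PySem.List.pyRange 0 (grille.length : Int) 1).foldl
      (fun (st : List (List (Int × Int)) × List (Int × Int)) ligne =>
        if PySem.List.pyGetD (PySem.List.pyGetD grille ligne []) c 1 = 0 then
          (st.1, st.2 ++ [(ligne, c)])
        else if st.2.length ≥ 2 then (st.1 ++ [st.2], ([] : List (Int × Int)))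
        else (st.1, []))
      (gs, [])
     if st.2.length ≥ 2 then st.1 ++ [st.2] else st.1)
    = gs ++ pvColRunsB c
        ((PySem.List.pyRange 0 (grille.length : Int) 1).map (fun ligne =>
          PySem.List.pyGetD (PySem.List.pyGetD grille ligne []) c 1 == 0)) 0 := by
  have hstep : (fun (st : List (List (Int × Int)) × List (Int × Int)) ligne =>
      if PySem.List.pyGetD (PySem.List.pyGetD grille ligne []) c 1 = 0 then
        (st.1, st.2 ++ [(ligne, c)])
      else if st.2.length ≥ 2 then (st.1 ++ [st.2], ([] : List (Int × Int)))
      else (st.1, []))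
      = pvStepA (fun ligne => PySem.List.pyGetD (PySem.List.pyGetD grille ligne []) c 1 == 0) c := by
    funext st l
    unfold pvStepA
    by_cases h : PySem.List.pyGetD (PySem.List.pyGetD grille l []) c 1 = 0 <;> simp [h]
  rw [hstep]
  rw [show ((grille.length : Int)) = 0 + (grille.length : Int) by omega]
  rw [pvL1 _ c grille.length 0, pvL2 _ c grille.length 0 [] gs]
  show pvFlushA (gs ++ _, _) = _
  rw [pvFlushAppend gs, pvMain _ c grille.length 0]

-- ===== VERDICT (by name: the statement is the Claim_ definition above) =====
theorem trouver_groupes_verticaux_kakuro_spec : Claim_equal_trouver_groupes_verticaux_kakuro := by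
  intro grille _ _
  unfold Spec_trouver_groupes_verticaux_kakuro
  unfold trouver_groupes_verticaux_kakuro trouver_groupes_verticaux_kakuro_alt
  simp only [PySem.List.len_eq]
  apply PySem.List.foldl_congr_mem
  intro gs colonne _
  exact pvCol grille colonne gs
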